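-- pv_equiv track=rewrite | github.com/Kundankkrishna/Python-DSA | agpaircounter.py | countagpair
-- ===== SOURCE A (Python) =====
-- def countagpair(arr):
--     ans = 0
--     acount = 0
--     for i in range(0, len(arr)):
--         if arr[i] == "a":
--             acount += 1
--         if arr[i] == "g":
--             ans += acount
--     return ans %(10**9 + 7)
-- ===== SOURCE B (Python) =====
-- def countagpair(arr):
--     # staged: extract the index lists of "a"s and "g"s, then count pairs by
--     # summing, for each g-index, how many a-indices precede it
--     a_pos = [i for i, x in enumerate(arr) if x == "a"]
--     g_pos = [j for j, x in enumerate(arr) if x == "g"]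
--     ans = sum(sum(1 for i in a_pos if i < j) for j in g_pos)
--     return ans % (10**9 + 7)
-- ===== Notes on version B (the rewrite author's own statement) =====
-- stated objective: alternative
-- what changed: B first extracts the two index lists of 'a's and 'g's via enumerate, then counts the pairs combinatorially by summing, for each g-index, how many a-indices are smaller; A instead runs one forward pass with a live a-counter.
import Mathlib
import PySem

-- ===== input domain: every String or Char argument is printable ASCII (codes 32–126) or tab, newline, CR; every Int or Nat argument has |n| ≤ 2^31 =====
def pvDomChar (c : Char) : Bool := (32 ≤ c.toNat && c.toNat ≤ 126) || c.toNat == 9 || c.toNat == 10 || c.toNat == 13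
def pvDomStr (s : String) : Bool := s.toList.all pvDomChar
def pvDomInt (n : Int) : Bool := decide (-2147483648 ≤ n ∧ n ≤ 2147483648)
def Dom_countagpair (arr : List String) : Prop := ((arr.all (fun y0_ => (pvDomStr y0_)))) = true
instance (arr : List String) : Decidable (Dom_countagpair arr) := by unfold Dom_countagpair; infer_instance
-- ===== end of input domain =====

-- B restates the count combinatorially (index lists + pair counting) instead of A's one-pass accumulator; same result, not faster.

-- ===== PORT A =====
-- loop body of A: state (ans, acount); acount updated first, then ans, as in the Python
def stepA (s : Int × Int) (x : String) : Int × Int :=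
  let ac := if x = "a" then s.2 + 1 else s.2
  (if x = "g" then s.1 + ac else s.1, ac)

def countagpair (arr : List String) : Int :=
  let r := (PySem.List.pyRange 0 (PySem.List.len arr) 1).foldl
    (fun s i => stepA s (PySem.List.pyGetD arr i "")) ((0 : Int), (0 : Int))
  PySem.Int.mod r.1 (10 ^ 9 + 7)

-- ===== PORT B =====
def aPosB (arr : List String) : List Int :=
  (PySem.List.enumerate arr).filterMap (fun p => if p.2 = "a" then some p.1 else none)

def gPosB (arr : List String) : List Int :=
  (PySem.List.enumerate arr).filterMap (fun p => if p.2 = "g" then some p.1 else none)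

def countagpair_alt (arr : List String) : Int :=
  let aPos := aPosB arr
  let gPos := gPosB arr
  let ans : Int := (gPos.map (fun j => ((aPos.filter (fun i => i < j)).length : Int))).sum
  PySem.Int.mod ans (10 ^ 9 + 7)

-- ===== PRECONDITION & SPEC =====
def Spec_countagpair (arr : List String) (out : Int) : Prop := out = countagpair_alt arr
instance (arr : List String) (out : Int) : Decidable (Spec_countagpair arr out) := by unfold Spec_countagpair; infer_instance

-- ===== CLAIM =====
def Claim_equal_countagpair : Prop := ∀ (arr : List String), Dom_countagpair arr → Spec_countagpair arr (countagpair arr)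

-- ===== LEMMAS AND PROOFS =====

theorem aPosB_append (l : List String) (x : String) :
    aPosB (l ++ [x]) = aPosB l ++ (if x = "a" then [((l.length : Int))] else []) := by
  unfold aPosB
  rw [PySem.List.enumerate_append, List.filterMap_append]
  congr 1
  by_cases h : x = "a" <;> simp [PySem.List.enumerate, h]

theorem gPosB_append (l : List String) (x : String) :
    gPosB (l ++ [x]) = gPosB l ++ (if x = "g" then [((l.length : Int))] else []) := by
  unfold gPosB
  rw [PySem.List.enumerate_append, List.filterMap_append]
  congr 1
  by_cases h : x = "g" <;> simp [PySem.List.enumerate, h]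

theorem aPosB_lt (l : List String) : ∀ i ∈ aPosB l, i < (l.length : Int) := by
  intro i hi
  unfold aPosB at hi
  obtain ⟨p, hp, hif⟩ := List.mem_filterMap.mp hi
  obtain ⟨k, hk, rfl⟩ := (PySem.List.mem_enumerate_iff _ _ _).mp hp
  split_ifs at hif <;> simp_all;
  omega

theorem gPosB_lt (l : List String) : ∀ j ∈ gPosB l, j < (l.length : Int) := by
  intro j hj
  unfold gPosB at hj
  obtain ⟨p, hp, hif⟩ := List.mem_filterMap.mp hj
  obtain ⟨k, hk, rfl⟩ := (PySem.List.mem_enumerate_iff _ _ _).mp hp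
  split_ifs at hif <;> simp_all;
  omega

def ansB (arr : List String) : Int :=
  ((gPosB arr).map (fun j => (((aPosB arr).filter (fun i => i < j)).length : Int))).sum

theorem key (l : List String) :
    (l.foldl stepA ((0 : Int), (0 : Int))).2 = ((aPosB l).length : Int)
    ∧ (l.foldl stepA ((0 : Int), (0 : Int))).1 = ansB l := by
  induction l using List.reverseRecOn with
  | nil => simp [aPosB, gPosB, ansB, PySem.List.enumerate]
  | append_singleton l x ih =>
    obtain ⟨h2, h1⟩ := ih
    have haP := aPosB_append l x
    have hgP := gPosB_append l x
    -- a-indices of the extended list below any old g-index, and below l.length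
    have hfilt : ∀ (j : Int), j ≤ (l.length : Int) →
        (aPosB (l ++ [x])).filter (fun i => i < j) = (aPosB l).filter (fun i => i < j) := by
      intro j hj
      rw [haP, List.filter_append]
      have : List.filter (fun i => decide (i < j)) (if x = "a" then [((l.length : Int))] else []) = [] := by
        split_ifs <;> simp; omega
      rw [this, List.append_nil]
    have hLHS : (l ++ [x]).foldl stepA ((0 : Int), (0 : Int)) = stepA (l.foldl stepA ((0:Int),(0:Int))) x := by
      rw [List.foldl_append]; simp
    have hmap : ((gPosB l).map (fun j => (((aPosB (l ++ [x])).filter (fun i => i < j)).length : Int)))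
        = (gPosB l).map (fun j => (((aPosB l).filter (fun i => i < j)).length : Int)) := by
      apply List.map_congr_left
      intro j hj
      rw [hfilt j (le_of_lt (gPosB_lt l j hj))]
    have hfull : (aPosB (l ++ [x])).filter (fun i => i < (l.length : Int)) = aPosB l := by
      rw [hfilt _ (le_refl _)]
      exact List.filter_eq_self.mpr (fun a ha => decide_eq_true (aPosB_lt l a ha))
    have hans : ansB (l ++ [x]) = ansB l + (if x = "g" then ((aPosB l).length : Int) else 0) := by
      unfold ansB
      rw [hgP, List.map_append, List.sum_append, hmap]
      congr 1
      split_ifs with h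
      · simp [hfull]
      · simp
    constructor
    · rw [hLHS]
      simp only [stepA, haP]
      by_cases ha : x = "a" <;> simp [ha, h2]
    · rw [hLHS, hans]
      simp only [stepA]
      by_cases ha : x = "a" <;> by_cases hg : x = "g" <;> simp_all

theorem countagpair_spec : Claim_equal_countagpair := by
  intro arr _
  unfold Spec_countagpair countagpair countagpair_alt
  rw [PySem.List.foldl_pyRange_zero_pyGetD arr "" stepA ((0 : Int), (0 : Int))]
  have h := (key arr).2
  exact congrArg (fun z => PySem.Int.mod z (10 ^ 9 + 7)) h
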